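-- pv_equiv track=rewrite | github.com/defPyMe/dinamic_silos_wrapping_andres | loading.py | getting_ordered_list
-- ===== SOURCE A (Python) =====
-- def getting_ordered_list(dict_input, check):
--     check = {"loading":0 , "empty":1, "unloading":2,"full":3}
--     #getting the values
--     dict_input_statuses = [dict_input[i][0] for i in dict_input]
--     #ordering them according to plan so they are executed first
--     sorted_statuses  = sorted([check[i] for i in  dict_input_statuses])#[0, 1, 2]
--     #getting teh statuses ordered
--     ordered_values = []
--     #getting a list of statuses in correct order
--     #['loading', 'empty', 'unloading'])
--     for value in sorted_statuses:
--         ordered_values.append([i for i in check if check[i]==value][0])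
--
--     return sorted_statuses, ordered_values
-- ===== SOURCE B (Python) =====
-- def getting_ordered_list(dict_input, check):
--     # counting sort over the four known codes; no comparison sort, no reverse lookup
--     names = ["loading", "empty", "unloading", "full"]
--     code_of = {name: code for code, name in enumerate(names)}
--     codes = [code_of[dict_input[key][0]] for key in dict_input]
--     sorted_statuses = []
--     ordered_values = []
--     for c in range(4):
--         n = codes.count(c)
--         sorted_statuses += [c] * n
--         ordered_values += [names[c]] * n
--     return sorted_statuses, ordered_values
-- ===== Notes on version B (the rewrite author's own statement) =====
-- stated objective: alternative
-- what changed: B replaces A's comparison sort of the codes plus a per-element reverse filter over the check dict by a counting sort: it counts each of the four known codes once and emits the code/name buckets 0..3 in order.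
import Mathlib
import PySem

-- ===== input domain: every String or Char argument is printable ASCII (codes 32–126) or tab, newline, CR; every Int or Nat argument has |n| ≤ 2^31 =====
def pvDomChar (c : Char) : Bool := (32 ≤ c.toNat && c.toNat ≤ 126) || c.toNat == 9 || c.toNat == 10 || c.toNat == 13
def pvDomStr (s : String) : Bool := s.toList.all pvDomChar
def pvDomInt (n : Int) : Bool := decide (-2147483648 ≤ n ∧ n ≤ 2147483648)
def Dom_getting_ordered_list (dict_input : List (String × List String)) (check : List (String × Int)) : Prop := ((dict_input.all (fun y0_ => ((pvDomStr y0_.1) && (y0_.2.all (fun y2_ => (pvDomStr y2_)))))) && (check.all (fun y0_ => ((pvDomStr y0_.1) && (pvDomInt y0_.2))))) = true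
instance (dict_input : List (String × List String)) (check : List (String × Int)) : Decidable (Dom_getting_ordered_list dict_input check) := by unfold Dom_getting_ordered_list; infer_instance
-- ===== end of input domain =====

-- B replaces A's comparison sort + reverse lookup into `check` by a counting sort over the four
-- known status codes (objective: simpler/alternative; same observable return value).

-- ===== PORT A =====
-- the hardcoded dict A rebinds `check` to (the `check` parameter is ignored by A)
def pvCheck : PySem.Dict String Int :=
  PySem.Dict.ofList [("loading", 0), ("empty", 1), ("unloading", 2), ("full", 3)]

def getting_ordered_list (dict_input : List (String × List String)) (check : List (String × Int)) : List Int × List String :=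
  let check := pvCheck
  -- dict_input[i][0] for each key i of the dict; vs[0] (IndexError on []) is total under Pre_
  let dict_input_statuses : List String :=
    (PySem.Dict.ofList dict_input).values.map (fun vs => PySem.List.pyGetD vs 0 "")
  -- sorted([check[i] for i in dict_input_statuses]); check[i] (KeyError) is total under Pre_
  let sorted_statuses : List Int :=
    PySem.List.sorted (dict_input_statuses.map (fun i => check.getD i 0)) (fun x => x) false
  -- for value in sorted_statuses: ordered_values.append([i for i in check if check[i]==value][0])
  let ordered_values : List String :=
    sorted_statuses.foldl (fun acc value =>
      acc ++ [(check.keys.filter (fun i => check.getD i 0 == value)).headD ""]) []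
  (sorted_statuses, ordered_values)

-- ===== PORT B =====
def getting_ordered_list_alt (dict_input : List (String × List String)) (check : List (String × Int)) : List Int × List String :=
  let names : List String := ["loading", "empty", "unloading", "full"]
  let code_of : PySem.Dict String Int :=
    PySem.Dict.ofList ((PySem.List.enumerate names).map (fun p => (p.2, p.1)))
  let codes : List Int :=
    (PySem.Dict.ofList dict_input).values.map (fun vs => code_of.getD (PySem.List.pyGetD vs 0 "") 0)
  (PySem.List.pyRange 0 4 1).foldl (fun acc c =>
      let n : Int := PySem.List.count codes c
      (acc.1 ++ PySem.List.pyRepeat [c] n,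
       acc.2 ++ PySem.List.pyRepeat [PySem.List.pyGetD names c ""] n)) ([], [])

-- ===== PRECONDITION & SPEC =====
-- A raises (IndexError / KeyError) unless every value list of the dict is nonempty with a first
-- element among the four hardcoded statuses; Pre_ admits exactly those inputs.
def Pre_getting_ordered_list (dict_input : List (String × List String)) (check : List (String × Int)) : Prop :=
  ((PySem.Dict.ofList dict_input).values.all
    (fun vs => !vs.isEmpty && ["loading", "empty", "unloading", "full"].contains (vs.headD ""))) = true
instance (dict_input : List (String × List String)) (check : List (String × Int)) : Decidable (Pre_getting_ordered_list dict_input check) := by unfold Pre_getting_ordered_list; infer_instance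

def pvWitness_getting_ordered_list : (List (String × List String)) × (List (String × Int)) :=
  ([("s1", ["full", "x"]), ("s2", ["loading"]), ("s3", ["empty"])], [("a", 7)])

def Spec_getting_ordered_list (dict_input : List (String × List String)) (check : List (String × Int)) (out : List Int × List String) : Prop := out = getting_ordered_list_alt dict_input check
instance (dict_input : List (String × List String)) (check : List (String × Int)) (out : List Int × List String) : Decidable (Spec_getting_ordered_list dict_input check out) := by unfold Spec_getting_ordered_list; infer_instance

-- ===== CLAIM (what is proved, stated in full; the proofs are below) =====
def Claim_equal_getting_ordered_list : Prop := ∀ (dict_input : List (String × List String)) (check : List (String × Int)), Dom_getting_ordered_list dict_input check → Pre_getting_ordered_list dict_input check → Spec_getting_ordered_list dict_input check (getting_ordered_list dict_input check)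

-- ===== LEMMAS AND PROOFS =====

-- a list drawn from {0,1,2,3}, sorted, is the concatenation of its count-buckets
lemma sorted_buckets (L : List Int) (h : ∀ x ∈ L, x = 0 ∨ x = 1 ∨ x = 2 ∨ x = 3) :
    PySem.List.sorted L (fun x => x) false =
      List.replicate (L.count 0) 0 ++ List.replicate (L.count 1) 1 ++
      List.replicate (L.count 2) 2 ++ List.replicate (L.count 3) 3 := by
  apply PySem.List.eq_of_perm_of_pairwise_le_of_injective (fun x => x) (fun a b hab => hab)
  · refine (PySem.List.sorted_perm L (fun x => x) false).trans (List.perm_iff_count.2 (fun a => ?_))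
    simp only [List.count_append, List.count_replicate]
    rcases Decidable.em (a = 0 ∨ a = 1 ∨ a = 2 ∨ a = 3) with ha | ha
    · rcases ha with rfl | rfl | rfl | rfl <;> simp
    · push Not at ha
      obtain ⟨h0, h1, h2, h3⟩ := ha
      rw [List.count_eq_zero.2 (fun hm => by rcases h a hm with rfl | rfl | rfl | rfl <;> simp_all)]
      rw [if_neg (fun e => h0 (beq_iff_eq.mp e).symm), if_neg (fun e => h1 (beq_iff_eq.mp e).symm),
          if_neg (fun e => h2 (beq_iff_eq.mp e).symm), if_neg (fun e => h3 (beq_iff_eq.mp e).symm)]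
  · exact PySem.List.sorted_pairwise L (fun x => x)
  · simp only [List.pairwise_append, List.pairwise_replicate, List.mem_append, List.mem_replicate]
    refine ⟨⟨⟨?_, ?_, ?_⟩, ?_, ?_⟩, ?_, ?_⟩ <;> intros <;> simp_all <;> omega

theorem getting_ordered_list_spec : Claim_equal_getting_ordered_list := by
  intro dict_input check _hdom hpre
  unfold Pre_getting_ordered_list at hpre
  rw [List.all_eq_true] at hpre
  unfold Spec_getting_ordered_list getting_ordered_list getting_ordered_list_alt
  simp only [PySem.List.foldl_append_singleton_eq_map, List.nil_append, List.map_map, Function.comp_def]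
  have hco : PySem.Dict.ofList ((PySem.List.enumerate ["loading", "empty", "unloading", "full"]).map
      (fun p => (p.2, p.1))) = pvCheck := by decide
  rw [hco]
  set S := (PySem.Dict.ofList dict_input).values with hS
  set L : List Int := S.map (fun vs => pvCheck.getD (PySem.List.pyGetD vs 0 "") 0) with hLdef
  have hmem : ∀ x ∈ L, x = 0 ∨ x = 1 ∨ x = 2 ∨ x = 3 := by
    intro x hx
    rw [hLdef, List.mem_map] at hx
    obtain ⟨vs, hvs, rfl⟩ := hx
    have hv := hpre vs hvs
    match vs, hv with
    | [], hv => simp at hv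
    | a :: t, hv =>
      simp only [List.isEmpty_cons, List.headD_cons, Bool.not_false, Bool.true_and,
        List.contains_eq_mem, decide_eq_true_eq, List.mem_cons,
        List.not_mem_nil, or_false] at hv
      rw [PySem.List.pyGetD_zero_cons]
      rcases hv with rfl | rfl | rfl | rfl <;> decide
  rw [sorted_buckets L hmem]
  have hrange : PySem.List.pyRange 0 4 1 = [0, 1, 2, 3] := by decide
  rw [hrange]
  simp only [List.foldl_cons, List.foldl_nil, PySem.List.pyRepeat_singleton, PySem.List.count_eq]
  have f0 : (List.find? (fun i => pvCheck.getD i 0 == (0 : Int)) pvCheck.keys).getD "" = "loading" := by decide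
  have f1 : (List.find? (fun i => pvCheck.getD i 0 == (1 : Int)) pvCheck.keys).getD "" = "empty" := by decide
  have f2 : (List.find? (fun i => pvCheck.getD i 0 == (2 : Int)) pvCheck.keys).getD "" = "unloading" := by decide
  have f3 : (List.find? (fun i => pvCheck.getD i 0 == (3 : Int)) pvCheck.keys).getD "" = "full" := by decide
  have g1 : PySem.List.pyGetD ["loading", "empty", "unloading", "full"] (1 : Int) "" = "empty" := by decide
  have g2 : PySem.List.pyGetD ["loading", "empty", "unloading", "full"] (2 : Int) "" = "unloading" := by decide
  have g3 : PySem.List.pyGetD ["loading", "empty", "unloading", "full"] (3 : Int) "" = "full" := by decide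
  simp [List.map_append, List.map_replicate, List.append_assoc, f0, f1, f2, f3, g1, g2, g3]
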